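-- pv_equiv track=rewrite | github.com/WINAK-UA/lidkaart-stickers | main.py | make_trios
-- ===== SOURCE A (Python) =====
-- def make_trios(codes):
--     trios = list()  # Final list of all rows (with 3 number-code-pairs per row)
--
--     # Make sure the codes is a multiple of 3
--     if len(codes) % 3:
--         for i in range(3 - (len(codes) % 3)):
--             codes.append("")
--
--     counter = 1
--     trio = list()
--     for code in codes:
--         current = (counter, code)  # lidnr, code tuple
--         trio.append(current)
--
--         if counter % 3 == 0:
--             trios.append(trio)
--             trio = list()
--
--         counter += 1
--
--     return trios
-- ===== SOURCE B (Python) =====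
-- def make_trios(codes):
--     # pad in place to a multiple of 3, as A does (mutation preserved)
--     codes += [""] * ((3 - len(codes) % 3) % 3)
--     pairs = list(enumerate(codes, 1))
--     return [pairs[i:i + 3] for i in range(0, len(pairs), 3)]
-- ===== Notes on version B (the rewrite author's own statement) =====
-- stated objective: simpler
-- what changed: Replaces the running-counter/modulo flush loop by building all (index, code) pairs with one enumerate pass and then slicing that list into fixed chunks of three.
import Mathlib
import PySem

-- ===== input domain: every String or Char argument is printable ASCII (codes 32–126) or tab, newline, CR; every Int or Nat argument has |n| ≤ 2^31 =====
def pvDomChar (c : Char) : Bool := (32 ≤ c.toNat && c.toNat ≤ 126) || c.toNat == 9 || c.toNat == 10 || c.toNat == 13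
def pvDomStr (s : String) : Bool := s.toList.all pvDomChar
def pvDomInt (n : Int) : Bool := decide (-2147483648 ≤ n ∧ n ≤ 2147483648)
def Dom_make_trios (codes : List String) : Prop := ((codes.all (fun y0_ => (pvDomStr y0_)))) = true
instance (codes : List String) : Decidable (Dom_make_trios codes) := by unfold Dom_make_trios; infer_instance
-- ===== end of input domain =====

-- B replaces A's running-counter/modulo flush by one enumerate pass sliced into chunks of
-- three (simpler decomposition). Both A and B pad the caller's list in place the same way;
-- the equivalence proved here is about the return value.

-- ===== PORT A =====
-- A's loop body: append (counter, code) to the current trio; flush it when counter % 3 == 0.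
def pvStepA (s : List (List (Int × String)) × Int × List (Int × String)) (code : String) :
    List (List (Int × String)) × Int × List (Int × String) :=
  let trio := s.2.2 ++ [(s.2.1, code)]
  if PySem.Int.mod s.2.1 3 == 0 then (s.1 ++ [trio], s.2.1 + 1, [])
  else (s.1, s.2.1 + 1, trio)

def make_trios (codes : List String) : List (List (Int × String)) :=
  let codes :=
    if codes.length % 3 ≠ 0 then
      (PySem.List.pyRange 0 (3 - ((codes.length % 3 : Nat) : Int)) 1).foldl
        (fun cs _ => cs ++ [""]) codes
    else codes
  (codes.foldl pvStepA ([], 1, [])).1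

-- ===== PORT B =====
def make_trios_alt (codes : List String) : List (List (Int × String)) :=
  let codes := codes ++ List.replicate ((3 - codes.length % 3) % 3) ""
  let pairs := PySem.List.enumerate codes 1
  (PySem.List.pyRange 0 (PySem.List.len pairs) 3).map
    (fun i => PySem.List.slice pairs (some i) (some (i + 3)))

-- ===== PRECONDITION & SPEC =====
def Spec_make_trios (codes : List String) (out : List (List (Int × String))) : Prop := out = make_trios_alt codes
instance (codes : List String) (out : List (List (Int × String))) : Decidable (Spec_make_trios codes out) := by unfold Spec_make_trios; infer_instance

-- ===== CLAIM (what is proved, stated in full; the proofs are below) =====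
def Claim_equal_make_trios : Prop := ∀ (codes : List String), Dom_make_trios codes → Spec_make_trios codes (make_trios codes)

-- ===== LEMMAS AND PROOFS =====

-- the common shape both programs compute: the list cut into rows of three
def pvChunk3 {α : Type} : List α → List (List α)
  | a :: b :: c :: r => [a, b, c] :: pvChunk3 r
  | _ => []

lemma pvPadFold (r : List Int) : ∀ (cs : List String),
    r.foldl (fun cs _ => cs ++ [""]) cs = cs ++ List.replicate r.length "" := by
  induction r with
  | nil => simp
  | cons x r ih =>
    intro cs
    rw [List.foldl_cons, ih, List.append_assoc]
    simp [List.replicate_succ]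

-- A's fold, taken three elements at a time, produces the chunks of the enumeration
lemma pvFoldA (m : Nat) : ∀ (l : List String), l.length = 3 * m →
    ∀ (trios : List (List (Int × String))) (j : Int),
      (l.foldl pvStepA (trios, 3 * j + 1, [])).1 =
        trios ++ pvChunk3 (PySem.List.enumerate l (3 * j + 1)) := by
  induction m with
  | zero =>
    intro l hl
    have : l = [] := List.length_eq_zero_iff.mp (by omega)
    subst this
    intro trios j
    simp [PySem.List.enumerate, pvChunk3]
  | succ m ih =>
    intro l hl
    match l with
    | a :: b :: c :: r =>
      intro trios j
      have hr : r.length = 3 * m := by simp at hl; omega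
      have e1 : PySem.Int.mod (3 * j + 1) 3 = (3 * j + 1) % 3 :=
        PySem.Int.mod_eq_emod_of_pos (by norm_num)
      have e2 : PySem.Int.mod (3 * j + 1 + 1) 3 = (3 * j + 1 + 1) % 3 :=
        PySem.Int.mod_eq_emod_of_pos (by norm_num)
      have e3 : PySem.Int.mod (3 * j + 1 + 1 + 1) 3 = (3 * j + 1 + 1 + 1) % 3 :=
        PySem.Int.mod_eq_emod_of_pos (by norm_num)
      have h1 : ¬ ((3:Int) ∣ (3 * j + 1)) := by omega
      have h2 : ¬ ((3:Int) ∣ (3 * j + 1 + 1)) := by omega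
      have h3 : (3:Int) ∣ (3 * j + 1 + 1 + 1) := by omega
      have step3 : (a :: b :: c :: r).foldl pvStepA (trios, 3 * j + 1, []) =
          r.foldl pvStepA
            (trios ++ [[(3 * j + 1, a), (3 * j + 1 + 1, b), (3 * j + 1 + 1 + 1, c)]],
             3 * j + 1 + 1 + 1 + 1, []) := by
        simp only [List.foldl_cons]
        simp [pvStepA, h2, h3, beq_iff_eq]
      rw [step3]
      have hj : 3 * j + 1 + 1 + 1 + 1 = 3 * (j + 1) + 1 := by ring
      rw [hj, ih r hr _ (j + 1)]
      simp only [PySem.List.enumerate_cons, pvChunk3]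
      have : 3 * j + 1 + 1 + 1 + 1 = 3 * (j + 1) + 1 := by ring
      simp [this]

-- B's chunking pass, in its drop/take form, produces the same chunks
lemma pvChunkB (m : Nat) : ∀ (pairs : List (Int × String)), pairs.length = 3 * m →
    (List.range m).map (fun k => (pairs.drop (3 * k)).take 3) = pvChunk3 pairs := by
  induction m with
  | zero =>
    intro pairs hp
    have : pairs = [] := List.length_eq_zero_iff.mp (by omega)
    subst this; simp [pvChunk3]
  | succ m ih =>
    intro pairs hp
    match pairs with
    | a :: b :: c :: r =>
      have hr : r.length = 3 * m := by simp at hp; omega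
      rw [List.range_succ_eq_map, List.map_cons, List.map_map]
      have hf : ((fun k => ((a :: b :: c :: r).drop (3 * k)).take 3) ∘ Nat.succ) =
          fun k => (r.drop (3 * k)).take 3 := by
        funext k
        have h33 : 3 * Nat.succ k = 3 + 3 * k := by omega
        simp only [Function.comp, h33, ← List.drop_drop]
        rfl
      rw [hf, ih r hr]
      simp [pvChunk3]

-- evaluate B on a list whose length is a multiple of three
lemma pvAltChunk (m : Nat) (pairs : List (Int × String)) (hp : pairs.length = 3 * m) :
    (PySem.List.pyRange 0 (PySem.List.len pairs) 3).map
      (fun i => PySem.List.slice pairs (some i) (some (i + 3))) = pvChunk3 pairs := by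
  rw [PySem.List.len_eq, hp]
  rw [PySem.List.pyRange_of_pos _ _ (by norm_num : (0:Int) < 3)]
  have hcount : (if (0:Int) < ((3 * m : Nat) : Int) then
      ((((3 * m : Nat) : Int) - 0 + 3 - 1) / 3).toNat else 0) = m := by
    split_ifs with h
    · have : (((3 * m : Nat) : Int) - 0 + 3 - 1) / 3 = (m : Int) := by
        push_cast; omega
      rw [this]; simp
    · push_cast at h; omega
  rw [hcount, List.map_map]
  rw [← pvChunkB m pairs hp]
  apply List.map_congr_left
  intro k _
  have h1 : (0 : Int) + 3 * (k : Int) = ((3 * k : Nat) : Int) := by push_cast; ring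
  simp only [Function.comp, h1]
  have hs := PySem.List.slice_natCast_add pairs (3 * k) 3
  simpa using hs

-- ===== VERDICT (by name: the statement is the Claim_ definition above) =====
theorem make_trios_spec : Claim_equal_make_trios := by
  intro codes _
  unfold Spec_make_trios make_trios make_trios_alt
  set k : Nat := (3 - codes.length % 3) % 3 with hk
  have hpad :
      (if codes.length % 3 ≠ 0 then
        (PySem.List.pyRange 0 (3 - ((codes.length % 3 : Nat) : Int)) 1).foldl
          (fun cs _ => cs ++ [""]) codes
      else codes) = codes ++ List.replicate k "" := by
    by_cases h : codes.length % 3 = 0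
    · simp [h, hk]
    · have hmod : codes.length % 3 = 1 ∨ codes.length % 3 = 2 := by omega
      rw [if_pos h, pvPadFold]
      congr 1
      rw [PySem.List.length_pyRange_one]
      congr 1
      rcases hmod with hm | hm <;> simp [hk, hm]
  rw [hpad]
  have hlen : (codes ++ List.replicate k "").length = codes.length + k := by simp
  have hdvd : ∃ m : Nat, (codes ++ List.replicate k "").length = 3 * m := by
    refine ⟨(codes.length + k) / 3, ?_⟩
    rw [hlen]; omega
  obtain ⟨m, hm⟩ := hdvd
  have hA := pvFoldA m (codes ++ List.replicate k "") hm [] 0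
  have hB := pvAltChunk m (PySem.List.enumerate (codes ++ List.replicate k "") 1)
    (by rw [PySem.List.length_enumerate]; exact hm)
  simp only [show (3 : Int) * 0 + 1 = 1 by ring] at hA
  rw [hA, hB]
  simp
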